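-- pv_equiv track=rewrite | github.com/surachai-p/DSA-2024-Stack | test 4.py | is_valid_json
-- ===== SOURCE A (Python) =====
-- def is_valid_json(json_string):
--     """
--     ตรวจสอบความถูกต้องของ JSON string โดยใช้ Stack
--
--     Args:
--         json_string (str): JSON string ที่ต้องการตรวจสอบ
--
--     Returns:
--         bool: True ถ้า JSON string ถูกต้อง False ถ้าไม่ถูกต้อง
--     """
--
--     stack = []
--     opening_brackets = ['{', '[']
--     closing_brackets = ['}', ']']
--
--     for char in json_string:
--         if char in opening_brackets:
--             stack.append(char)
--         elif char in closing_brackets: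
--             if not stack:
--                 return False
--             top = stack.pop()
--             if (char == '}' and top != '{') or (char == ']' and top != '['):
--                 return False
--
--     return not stack
-- ===== SOURCE B (Python) =====
-- def is_valid_json(json_string):
--     t = ''.join(c for c in json_string if c in '{}[]')
--     while '{}' in t or '[]' in t:
--         t = t.replace('{}', '').replace('[]', '')
--     return t == ''
-- ===== Notes on version B (the rewrite author's own statement) =====
-- stated objective: alternative
-- what changed: B maintains no stack: it filters the string down to its bracket characters and then repeatedly deletes adjacent matched curly/square pairs until none remain, returning whether the residue is empty.
import Mathlib
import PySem

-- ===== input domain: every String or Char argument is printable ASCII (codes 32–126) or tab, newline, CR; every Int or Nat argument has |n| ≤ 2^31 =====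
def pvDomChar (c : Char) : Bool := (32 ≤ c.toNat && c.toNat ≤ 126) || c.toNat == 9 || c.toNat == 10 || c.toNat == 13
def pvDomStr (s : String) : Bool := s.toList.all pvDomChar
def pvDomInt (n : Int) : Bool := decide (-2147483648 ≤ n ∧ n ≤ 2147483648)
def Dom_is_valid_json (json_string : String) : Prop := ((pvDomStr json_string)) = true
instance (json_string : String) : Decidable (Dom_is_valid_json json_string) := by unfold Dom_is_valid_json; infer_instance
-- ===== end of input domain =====

-- B replaces the stack scan by repeated deletion of adjacent matched bracket pairs
-- from the bracket-only residue of the string (a different algorithm; the timing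
-- run measured it faster on the generated inputs).

-- ===== PORT A =====
-- the for-loop over the string; the Python stack (append/pop at the end) is the
-- list `stack` with its head as the top
def isvLoop : List Char → List Char → Bool
  | stack, [] => stack.isEmpty                             -- `return not stack`
  | stack, c :: rest =>
    if c = '{' ∨ c = '[' then                              -- char in opening_brackets
      isvLoop (c :: stack) rest
    else if c = '}' ∨ c = ']' then                         -- char in closing_brackets
      match stack with
      | [] => false                                        -- if not stack: return False
      | top :: stack' =>                                   -- top = stack.pop()
        if (c = '}' ∧ top ≠ '{') ∨ (c = ']' ∧ top ≠ '[') then false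
        else isvLoop stack' rest
    else isvLoop stack rest

def is_valid_json (json_string : String) : Bool :=
  isvLoop [] json_string.toList

-- ===== PORT B =====
-- c in '{}[]'
def pvIsBr (c : Char) : Bool := c = '{' || c = '}' || c = '[' || c = ']'

-- '<ab>' in t  (hand port of Python's two-character substring test; exact)
def pvHasSub (a b : Char) : List Char → Bool
  | x :: y :: r => (x = a && y = b) || pvHasSub a b (y :: r)
  | _ => false

-- t.replace('<ab>', '')  (hand port of str.replace with a two-character pattern of
-- distinct characters and empty replacement: left-to-right removal of
-- non-overlapping occurrences; exact)
def pvRemovePair (a b : Char) : List Char → List Char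
  | x :: y :: r => if x = a ∧ y = b then pvRemovePair a b r else x :: pvRemovePair a b (y :: r)
  | l => l

theorem pvRemovePair_length_le (a b : Char) : ∀ l, (pvRemovePair a b l).length ≤ l.length := by
  intro l
  induction l using pvRemovePair.induct a b with
  | case1 x y r hps ih =>
    simp only [pvRemovePair, if_pos hps, List.length_cons]; omega
  | case2 x y r hps ih =>
    simp only [pvRemovePair, if_neg hps, List.length_cons]
    simp only [List.length_cons] at ih; omega
  | case3 l h =>
    cases l with
    | nil => simp [pvRemovePair]
    | cons x t =>
      cases t with
      | nil => simp [pvRemovePair]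
      | cons y r => exact absurd rfl (h x y r)

theorem pvRemovePair_length_lt (a b : Char) :
    ∀ l, pvHasSub a b l = true → (pvRemovePair a b l).length < l.length := by
  intro l
  induction l using pvRemovePair.induct a b with
  | case1 x y r hps ih =>
    intro _
    simp only [pvRemovePair, if_pos hps, List.length_cons]
    have := pvRemovePair_length_le a b r; omega
  | case2 x y r hps ih =>
    intro h
    have hr : pvHasSub a b (y :: r) = true := by
      cases h' : pvHasSub a b (y :: r)
      · exfalso
        simp only [pvHasSub, h', Bool.or_false, Bool.and_eq_true, decide_eq_true_eq] at h
        exact hps h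
      · rfl
    simp only [pvRemovePair, if_neg hps, List.length_cons]
    have := ih hr; simp only [List.length_cons] at this; omega
  | case3 l h =>
    intro hcontra
    exfalso
    cases l with
    | nil => simp [pvHasSub] at hcontra
    | cons x t =>
      cases t with
      | nil => simp [pvHasSub] at hcontra
      | cons y r => exact absurd rfl (h x y r)

theorem pvRemovePair_eq_of_not (a b : Char) :
    ∀ l, pvHasSub a b l = false → pvRemovePair a b l = l := by
  intro l
  induction l using pvRemovePair.induct a b with
  | case1 x y r hps ih =>
    intro h; exfalso
    simp [pvHasSub, hps.1, hps.2] at h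
  | case2 x y r hps ih =>
    intro h
    simp only [pvHasSub, Bool.or_eq_false_iff] at h
    simp only [pvRemovePair, if_neg hps, ih h.2]
  | case3 l h =>
    intro _
    cases l with
    | nil => rfl
    | cons x t =>
      cases t with
      | nil => rfl
      | cons y r => exact absurd rfl (h x y r)

-- while '{}' in t or '[]' in t: t = t.replace('{}','').replace('[]','')
def pvReduce (t : List Char) : List Char :=
  if pvHasSub '{' '}' t || pvHasSub '[' ']' t then
    pvReduce (pvRemovePair '[' ']' (pvRemovePair '{' '}' t))
  else t
termination_by t.length
decreasing_by
  rename_i h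
  rcases Bool.or_eq_true _ _ |>.mp h with h1 | h1
  · calc (pvRemovePair '[' ']' (pvRemovePair '{' '}' t)).length
        ≤ (pvRemovePair '{' '}' t).length := pvRemovePair_length_le _ _ _
      _ < t.length := pvRemovePair_length_lt _ _ _ h1
  · by_cases h2 : pvHasSub '{' '}' t = true
    · calc (pvRemovePair '[' ']' (pvRemovePair '{' '}' t)).length
          ≤ (pvRemovePair '{' '}' t).length := pvRemovePair_length_le _ _ _
        _ < t.length := pvRemovePair_length_lt _ _ _ h2
    · rw [pvRemovePair_eq_of_not '{' '}' t (by simpa using h2)]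
      exact pvRemovePair_length_lt _ _ _ h1

def is_valid_json_alt (json_string : String) : Bool :=
  (pvReduce (json_string.toList.filter pvIsBr)).isEmpty   -- return t == ''

-- ===== PRECONDITION & SPEC =====
def Spec_is_valid_json (json_string : String) (out : Bool) : Prop := out = is_valid_json_alt json_string
instance (json_string : String) (out : Bool) : Decidable (Spec_is_valid_json json_string out) := by unfold Spec_is_valid_json; infer_instance

-- ===== CLAIM (what is proved, stated in full; the proofs are below) =====
def Claim_equal_is_valid_json : Prop := ∀ (json_string : String), Dom_is_valid_json json_string → Spec_is_valid_json json_string (is_valid_json json_string)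

-- ===== LEMMAS AND PROOFS =====

-- one step of A's loop, factored out
def pvStep (stack : List Char) (c : Char) : Option (List Char) :=
  if c = '{' ∨ c = '[' then some (c :: stack)
  else if c = '}' ∨ c = ']' then
    match stack with
    | [] => none
    | top :: stack' =>
      if (c = '}' ∧ top ≠ '{') ∨ (c = ']' ∧ top ≠ '[') then none else some stack'
  else some stack

theorem isvLoop_cons (st : List Char) (c : Char) (u : List Char) :
    isvLoop st (c :: u) = (pvStep st c).elim false (fun st' => isvLoop st' u) := by
  simp only [isvLoop, pvStep]
  split_ifs <;> first
    | rfl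
    | (cases st
       · rfl
       · (simp only [Option.elim]; split_ifs <;> rfl))

theorem isvLoop_nil (st : List Char) : isvLoop st [] = st.isEmpty := by
  simp [isvLoop]

-- A's loop ignores non-bracket characters
theorem isvLoop_filter : ∀ (l : List Char) (st : List Char),
    isvLoop st (l.filter pvIsBr) = isvLoop st l := by
  intro l
  induction l with
  | nil => intro st; rfl
  | cons c r ih =>
    intro st
    by_cases hb : pvIsBr c = true
    · rw [List.filter_cons_of_pos hb, isvLoop_cons, isvLoop_cons]
      cases pvStep st c <;> simp [ih]
    · rw [List.filter_cons_of_neg (by simpa using hb), isvLoop_cons]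
      have hc : pvStep st c = some st := by
        simp [pvIsBr] at hb
        simp [pvStep, hb]
      rw [hc]; simp [ih]

-- removing one kind of adjacent matched pair does not change A's verdict
theorem isvLoop_removePair (a b : Char) (hab : (a = '{' ∧ b = '}') ∨ (a = '[' ∧ b = ']')) :
    ∀ (n : ℕ) (l : List Char), l.length ≤ n → ∀ st, isvLoop st (pvRemovePair a b l) = isvLoop st l := by
  intro n
  induction n with
  | zero =>
    intro l hl st
    match l with
    | [] => rfl
  | succ n ih =>
    intro l hl st
    match l with
    | [] => rfl
    | [x] => simp [pvRemovePair]
    | x :: y :: r =>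
      by_cases hps : x = a ∧ y = b
      · simp only [pvRemovePair, if_pos hps]
        rw [ih r (by simp at hl; omega) st]
        rcases hps with ⟨hx, hy⟩; subst hx; subst hy
        rcases hab with ⟨ha, hb⟩ | ⟨ha, hb⟩ <;> subst ha <;> subst hb <;>
          simp [isvLoop_cons, pvStep]
      · simp only [pvRemovePair, if_neg hps]
        rw [isvLoop_cons, isvLoop_cons]
        cases pvStep st x <;>
          simp [ih (y :: r) (by simp at hl ⊢; omega)]

-- the loop body preserves A's verdict, hence so does the whole while loop
theorem isvLoop_reduce : ∀ (t : List Char) (st : List Char),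
    isvLoop st (pvReduce t) = isvLoop st t := by
  intro t
  induction t using pvReduce.induct with
  | case1 t h ih =>
    intro st
    rw [pvReduce, if_pos h, ih st,
        isvLoop_removePair '[' ']' (Or.inr ⟨rfl, rfl⟩) _ _ le_rfl,
        isvLoop_removePair '{' '}' (Or.inl ⟨rfl, rfl⟩) _ _ le_rfl]
  | case2 t h => intro st; rw [pvReduce, if_neg h]

theorem pvRemovePair_all (a b : Char) (p : Char → Bool) :
    ∀ l, l.all p = true → (pvRemovePair a b l).all p = true := by
  intro l
  induction l using pvRemovePair.induct a b with
  | case1 x y r hps ih => intro h; simp only [pvRemovePair, if_pos hps]; simp_all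
  | case2 x y r hps ih => intro h; simp only [pvRemovePair, if_neg hps]; simp_all
  | case3 l h =>
    intro ha
    cases l with
    | nil => exact ha
    | cons x t =>
      cases t with
      | nil => exact ha
      | cons y r => exact absurd rfl (h x y r)

theorem pvReduce_all (p : Char → Bool) :
    ∀ t, t.all p = true → (pvReduce t).all p = true := by
  intro t
  induction t using pvReduce.induct with
  | case1 t h ih =>
    intro ha
    rw [pvReduce, if_pos h]
    exact ih (pvRemovePair_all _ _ _ _ (pvRemovePair_all _ _ _ _ ha))
  | case2 t h => intro ha; rwa [pvReduce, if_neg h]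

theorem pvReduce_noSub : ∀ t,
    pvHasSub '{' '}' (pvReduce t) = false ∧ pvHasSub '[' ']' (pvReduce t) = false := by
  intro t
  induction t using pvReduce.induct with
  | case1 t h ih => rw [pvReduce, if_pos h]; exact ih
  | case2 t h =>
    rw [pvReduce, if_neg h]
    simpa [Bool.or_eq_false_iff] using h

-- a nonempty bracket-only string with no adjacent matched pair fails A's check
theorem isv_stuck_aux : ∀ (u : List Char) (c : Char) (st : List Char),
    (c = '{' ∨ c = '[') → u.all pvIsBr = true →
    pvHasSub '{' '}' (c :: u) = false → pvHasSub '[' ']' (c :: u) = false →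
    isvLoop (c :: st) u = false := by
  intro u
  induction u with
  | nil => intro c st _ _ _ _; simp [isvLoop_nil]
  | cons x r ih =>
    intro c st hc hall h1 h2
    simp only [pvHasSub, Bool.or_eq_false_iff] at h1 h2
    simp only [List.all_cons, Bool.and_eq_true] at hall
    have hx : x = '{' ∨ x = '}' ∨ x = '[' ∨ x = ']' := by
      have := hall.1; simp [pvIsBr] at this; tauto
    rcases hx with hx | hx | hx | hx <;> subst hx
    · rw [isvLoop_cons]
      have : pvStep (c :: st) '{' = some ('{' :: c :: st) := by simp [pvStep]
      rw [this]
      exact ih '{' (c :: st) (Or.inl rfl) hall.2 h1.2 h2.2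
    · -- x = '}': top is c; c = '{' contradicts h1, c = '[' mismatches
      rcases hc with hc | hc <;> subst hc
      · exfalso; simp at h1
      · rw [isvLoop_cons]
        have : pvStep ('[' :: st) '}' = none := by simp [pvStep]
        rw [this]; rfl
    · rw [isvLoop_cons]
      have : pvStep (c :: st) '[' = some ('[' :: c :: st) := by simp [pvStep]
      rw [this]
      exact ih '[' (c :: st) (Or.inr rfl) hall.2 h1.2 h2.2
    · rcases hc with hc | hc <;> subst hc
      · rw [isvLoop_cons]
        have : pvStep ('{' :: st) ']' = none := by simp [pvStep]
        rw [this]; rfl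
      · exfalso; simp at h2

theorem isv_stuck : ∀ (u : List Char), u.all pvIsBr = true →
    pvHasSub '{' '}' u = false → pvHasSub '[' ']' u = false →
    isvLoop [] u = u.isEmpty := by
  intro u hall h1 h2
  match u with
  | [] => rfl
  | x :: r =>
    simp only [List.all_cons, Bool.and_eq_true] at hall
    have hx : x = '{' ∨ x = '}' ∨ x = '[' ∨ x = ']' := by
      have := hall.1; simp [pvIsBr] at this; tauto
    rw [show (x :: r).isEmpty = false from rfl, isvLoop_cons]
    rcases hx with hx | hx | hx | hx <;> subst hx
    · have : pvStep [] '{' = some ['{'] := by simp [pvStep]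
      rw [this]
      exact isv_stuck_aux r '{' [] (Or.inl rfl) hall.2 h1 h2
    · have : pvStep [] '}' = none := by simp [pvStep]
      rw [this]; rfl
    · have : pvStep [] '[' = some ['['] := by simp [pvStep]
      rw [this]
      exact isv_stuck_aux r '[' [] (Or.inr rfl) hall.2 h1 h2
    · have : pvStep [] ']' = none := by simp [pvStep]
      rw [this]; rfl

-- ===== VERDICT (by name: the statement is the Claim_ definition above) =====
theorem is_valid_json_spec : Claim_equal_is_valid_json := by
  intro s _
  unfold Spec_is_valid_json is_valid_json is_valid_json_alt
  set t := s.toList.filter pvIsBr with ht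
  have hall : t.all pvIsBr = true := by
    simp [ht, List.all_filter]
  have hns := pvReduce_noSub t
  calc isvLoop [] s.toList
      = isvLoop [] t := (isvLoop_filter s.toList []).symm
    _ = isvLoop [] (pvReduce t) := (isvLoop_reduce t []).symm
    _ = (pvReduce t).isEmpty :=
        isv_stuck _ (pvReduce_all pvIsBr t hall) hns.1 hns.2
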